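-- pv_equiv track=rewrite | github.com/lvaughn/advent | 2023/5/part_2.py | apply_mappings
-- ===== SOURCE A (Python) =====
-- def apply_mappings(mappings, seed_range):
--     if len(mappings) == 0:
--         return [seed_range]
--     rng_start, rng_end = seed_range
--     for dest_start, src_start, length in mappings:
--         if src_start > rng_end:
--             continue
--         if src_start + length - 1 < rng_start:
--             continue
--         # We have a hit!
--         move = dest_start - src_start
--         return_values = []
--         if rng_start < src_start: # Do anything below that doesn't overlap
--             return_values.extend(apply_mappings(mappings, (rng_start, src_start-1)))
--         if rng_end > src_start + length - 1: # Do anything above that doesn't overlap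
--             return_values.extend(apply_mappings(mappings, (src_start + length, rng_end)))
--         # Handle the overlap
--         start_val = max(rng_start, src_start)
--         end_val = min(rng_end, src_start + length - 1)
--         return_values.append((start_val + move, end_val + move))
--         return return_values
--     return [seed_range]
-- ===== SOURCE B (Python) =====
-- def apply_mappings(mappings, seed_range):
--     # Iterative version: explicit stack of pending tasks replaces the recursion,
--     # reproducing the recursion's post-order output (below ++ above ++ overlap).
--     result = []
--     stack = [(False, seed_range)]  # (is_emit, payload)
--     while stack:
--         is_emit, payload = stack.pop()
--         if is_emit:
--             result.append(payload)
--             continue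
--         lo, hi = payload
--         hit = None
--         for dest_start, src_start, length in mappings:
--             if src_start <= hi and src_start + length - 1 >= lo:
--                 hit = (dest_start, src_start, length)
--                 break
--         if hit is None:
--             result.append((lo, hi))
--             continue
--         dest_start, src_start, length = hit
--         move = dest_start - src_start
--         # pushed in reverse of processing order: below is handled first, then above,
--         # and the translated overlap is emitted last
--         stack.append((True, (max(lo, src_start) + move,
--                              min(hi, src_start + length - 1) + move)))
--         if hi > src_start + length - 1:
--             stack.append((False, (src_start + length, hi)))
--         if lo < src_start:
--             stack.append((False, (lo, src_start - 1)))
--     return result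
-- ===== Notes on version B (the rewrite author's own statement) =====
-- stated objective: alternative
-- what changed: Replaced A's self-recursion on sub-intervals by an iterative explicit-stack worklist (deferred emit tasks reproduce the recursion's below ++ above ++ overlap post-order); the per-interval scan uses a single positive overlap test with break instead of two continue guards.
import Mathlib
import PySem

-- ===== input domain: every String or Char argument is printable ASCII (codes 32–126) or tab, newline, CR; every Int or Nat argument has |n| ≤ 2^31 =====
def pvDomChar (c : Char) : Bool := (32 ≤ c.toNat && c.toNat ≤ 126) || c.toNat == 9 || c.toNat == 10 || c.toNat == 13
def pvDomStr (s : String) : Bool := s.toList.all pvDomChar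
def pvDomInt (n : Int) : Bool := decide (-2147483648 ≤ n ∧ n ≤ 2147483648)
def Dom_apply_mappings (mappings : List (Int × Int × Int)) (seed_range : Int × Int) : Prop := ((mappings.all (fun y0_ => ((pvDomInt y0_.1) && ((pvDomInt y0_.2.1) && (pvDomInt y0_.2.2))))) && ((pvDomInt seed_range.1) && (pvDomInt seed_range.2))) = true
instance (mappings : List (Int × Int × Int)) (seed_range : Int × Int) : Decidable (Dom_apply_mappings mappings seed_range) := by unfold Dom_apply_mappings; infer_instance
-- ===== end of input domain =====

-- B replaces A's recursion on sub-intervals by an iterative explicit-stack worklist that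
-- reproduces the same post-order output; same cost, different control structure (alternative).

-- ===== PORT A =====
-- A's `for` loop over `mappings` with `continue`/`return` is the structural recursion amGo
-- over the remaining suffix `rest`; A's recursive calls go back to the full mapping list
-- (at a hit `mappings` is nonempty, so A's leading `len == 0` test there coincides with
-- amGo's `rest = []` base case).
def amGo (mappings : List (Int × Int × Int)) : Int → Int → List (Int × Int × Int) → List (Int × Int)
  | rng_start, rng_end, [] => [(rng_start, rng_end)]
  | rng_start, rng_end, (dest_start, src_start, length) :: rest =>
    if _h1 : src_start > rng_end then amGo mappings rng_start rng_end rest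
    else if _h2 : src_start + length - 1 < rng_start then amGo mappings rng_start rng_end rest
    else
      let move := dest_start - src_start
      let rv1 := if _h3 : rng_start < src_start then amGo mappings rng_start (src_start - 1) mappings else []
      let rv2 := if _h4 : rng_end > src_start + length - 1 then amGo mappings (src_start + length) rng_end mappings else []
      rv1 ++ rv2 ++ [(max rng_start src_start + move, min rng_end (src_start + length - 1) + move)]
termination_by a b rest => ((b - a).toNat, rest.length)
decreasing_by
  all_goals simp_wf
  all_goals first
    | exact Prod.Lex.right _ (by simp)
    | exact Prod.Lex.left _ _ (by omega)

def apply_mappings (mappings : List (Int × Int × Int)) (seed_range : Int × Int) : List (Int × Int) :=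
  if mappings.length = 0 then [seed_range]
  else amGo mappings seed_range.1 seed_range.2 mappings

-- ===== PORT B =====
-- Source B's inner `for ... break` scan for the first overlapping mapping
def bFindHit : List (Int × Int × Int) → Int → Int → Option (Int × Int × Int)
  | [], _, _ => none
  | (dest_start, src_start, length) :: rest, lo, hi =>
    if src_start ≤ hi ∧ src_start + length - 1 ≥ lo then some (dest_start, src_start, length)
    else bFindHit rest lo hi

-- weight measure used only to justify termination of the worklist loop
def taskW : ((Int × Int) ⊕ (Int × Int)) → Nat
  | Sum.inl (lo, hi) => 3 ^ ((hi - lo).toNat + 1)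
  | Sum.inr _ => 1

-- needed by bLoop's decreasing_by below (termination of the worklist), hence stated here
theorem bFindHit_some {ms : List (Int × Int × Int)} {lo hi d s l : Int}
    (h : bFindHit ms lo hi = some (d, s, l)) : s ≤ hi ∧ lo ≤ s + l - 1 := by
  induction ms with
  | nil => simp [bFindHit] at h
  | cons p rest ih =>
    obtain ⟨pd, ps, pl⟩ := p
    rw [bFindHit] at h
    split at h
    · rename_i hc
      simp only [Option.some.injEq, Prod.mk.injEq] at h
      obtain ⟨rfl, rfl, rfl⟩ := h
      omega
    · exact ih h

-- Source B's `while stack` loop; `Sum.inl` = pending interval task, `Sum.inr` = deferred emit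
def bLoop (mappings : List (Int × Int × Int)) : List ((Int × Int) ⊕ (Int × Int)) → List (Int × Int) → List (Int × Int)
  | [], result => result
  | (Sum.inr p) :: rest, result => bLoop mappings rest (result ++ [p])
  | (Sum.inl (lo, hi)) :: rest, result =>
    match h : bFindHit mappings lo hi with
    | none => bLoop mappings rest (result ++ [(lo, hi)])
    | some (dest_start, src_start, length) =>
      let move := dest_start - src_start
      let s1 := if lo < src_start then [Sum.inl (lo, src_start - 1)] else []
      let s2 := if hi > src_start + length - 1 then [Sum.inl (src_start + length, hi)] else []
      bLoop mappings (s1 ++ s2 ++ [Sum.inr (max lo src_start + move, min hi (src_start + length - 1) + move)] ++ rest) result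
termination_by stack _ => (stack.map taskW).sum
decreasing_by
  · simp [taskW]
  · simp [taskW]
  · obtain ⟨hs, hl⟩ := bFindHit_some h
    have e1 : lo < src_start → 3 ^ ((src_start - 1 - lo).toNat) * 3 ≤ 3 ^ ((hi - lo).toNat) := by
      intro c1; rw [← pow_succ]; exact Nat.pow_le_pow_right (by norm_num) (by omega)
    have e2 : hi > src_start + length - 1 → 3 ^ ((hi - (src_start + length)).toNat) * 3 ≤ 3 ^ ((hi - lo).toNat) := by
      intro c2; rw [← pow_succ]; exact Nat.pow_le_pow_right (by norm_num) (by omega)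
    have h3 : (1:Nat) ≤ 3 ^ ((hi - lo).toNat) := Nat.one_le_pow _ _ (by norm_num)
    by_cases c1 : lo < src_start <;> by_cases c2 : hi > src_start + length - 1
    · have hb1 := e1 c1; have hb2 := e2 c2
      have h4 : (2:Nat) ≤ 3 ^ ((hi - lo).toNat) :=
        le_trans (by norm_num) (Nat.pow_le_pow_right (by norm_num) (by omega : 1 ≤ (hi - lo).toNat))
      simp [c1, c2, taskW, pow_succ]; omega
    · have hb1 := e1 c1
      simp [c1, c2, taskW, pow_succ]; omega
    · have hb2 := e2 c2
      simp [c1, c2, taskW, pow_succ]; omega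
    · simp [c1, c2, taskW, pow_succ]; omega

def apply_mappings_alt (mappings : List (Int × Int × Int)) (seed_range : Int × Int) : List (Int × Int) :=
  bLoop mappings [Sum.inl seed_range] []


-- ===== PRECONDITION & SPEC =====
def Spec_apply_mappings (mappings : List (Int × Int × Int)) (seed_range : Int × Int) (out : List (Int × Int)) : Prop := out = apply_mappings_alt mappings seed_range
instance (mappings : List (Int × Int × Int)) (seed_range : Int × Int) (out : List (Int × Int)) : Decidable (Spec_apply_mappings mappings seed_range out) := by unfold Spec_apply_mappings; infer_instance

-- ===== CLAIM (what is proved, stated in full; the proofs are below) =====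
def Claim_equal_apply_mappings : Prop := ∀ (mappings : List (Int × Int × Int)) (seed_range : Int × Int), Dom_apply_mappings mappings seed_range → Spec_apply_mappings mappings seed_range (apply_mappings mappings seed_range)

-- ===== LEMMAS AND PROOFS =====

theorem amGo_scan (m : List (Int × Int × Int)) (lo hi : Int) :
    ∀ rest : List (Int × Int × Int), amGo m lo hi rest =
      match bFindHit rest lo hi with
      | none => [(lo, hi)]
      | some (d, s, l) =>
        (if lo < s then amGo m lo (s - 1) m else []) ++
        (if hi > s + l - 1 then amGo m (s + l) hi m else []) ++
        [(max lo s + (d - s), min hi (s + l - 1) + (d - s))] := by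
  intro rest
  induction rest with
  | nil => simp [amGo, bFindHit]
  | cons p rest ih =>
    obtain ⟨d, s, l⟩ := p
    rw [amGo, bFindHit]
    by_cases hc : s ≤ hi ∧ s + l - 1 ≥ lo
    · rw [if_pos hc, dif_neg (by omega), dif_neg (by omega)]
      simp [dite_eq_ite]
    · rw [if_neg hc]
      by_cases hy : s > hi
      · rw [dif_pos hy]; exact ih
      · rw [dif_neg hy, dif_pos (by omega)]; exact ih

theorem bLoop_inl (m : List (Int × Int × Int)) :
    ∀ (n : Nat) (lo hi : Int), (hi - lo).toNat < n →
      ∀ stack res, bLoop m (Sum.inl (lo, hi) :: stack) res = bLoop m stack (res ++ amGo m lo hi m) := by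
  intro n
  induction n with
  | zero => omega
  | succ n ih =>
    intro lo hi hlt stack res
    rw [bLoop]
    split
    · rename_i hfh
      rw [amGo_scan, hfh]
    · rename_i d s l hfh
      obtain ⟨hs, hl⟩ := bFindHit_some hfh
      rw [amGo_scan, hfh]
      by_cases c1 : lo < s <;> by_cases c2 : hi > s + l - 1 <;>
        simp only [c1, c2, if_true, if_false, List.nil_append,
          List.cons_append, List.append_assoc, List.append_nil]
      · rw [ih lo (s - 1) (by omega), ih (s + l) hi (by omega), bLoop]
        simp [List.append_assoc]
      · rw [ih lo (s - 1) (by omega), bLoop]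
        simp [List.append_assoc]
      · rw [ih (s + l) hi (by omega), bLoop]
        simp [List.append_assoc]
      · rw [bLoop]


-- ===== VERDICT (by name: the statement is the Claim_ definition above) =====
theorem apply_mappings_spec : Claim_equal_apply_mappings := by
  intro m s _
  unfold Spec_apply_mappings apply_mappings apply_mappings_alt
  rw [bLoop_inl m ((s.2 - s.1).toNat + 1) s.1 s.2 (by omega) [] []]
  rw [bLoop]
  split_ifs with h
  · have : m = [] := List.length_eq_zero_iff.mp h
    subst this
    simp [amGo]
  · simp
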